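-- pv_equiv track=rewrite | github.com/pbmartins/nypto | profiling.py | extract_silence
-- ===== SOURCE A (Python) =====
-- def extract_silence(data, threshold=256):
--     s = [1] if data[0] <= threshold else []
--
--     for i in range(1, len(data)):
--         if data[i] <= threshold:
--             if data[i-1] > threshold:
--                 s.append(1)
--             elif data[i-1] <= threshold:
--                 s[-1] += 1
--
--     return s
-- ===== SOURCE B (Python) =====
-- def extract_silence(data, threshold=256):
--     s = []
--     run = 0
--     for x in data:
--         if x <= threshold:
--             run += 1
--         else:
--             if run:
--                 s.append(run)
--             run = 0
--     if run:
--         s.append(run)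
--     return s
-- ===== Notes on version B (the rewrite author's own statement) =====
-- stated objective: simpler
-- what changed: B keeps a running run-length counter and appends a finished run when it ends, instead of A's edge detection via data[i-1] with in-place mutation of the last list element.
-- crash fix: A raises IndexError on empty data (it indexes data[0]); B's natural accumulator loop would return [] there, reproduced only by an explicit guard, so empty input is excluded by Pre_ and documented via Raises_. — e.g. on extract_silence([], 0): A raises IndexError, B returns []
import Mathlib
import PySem

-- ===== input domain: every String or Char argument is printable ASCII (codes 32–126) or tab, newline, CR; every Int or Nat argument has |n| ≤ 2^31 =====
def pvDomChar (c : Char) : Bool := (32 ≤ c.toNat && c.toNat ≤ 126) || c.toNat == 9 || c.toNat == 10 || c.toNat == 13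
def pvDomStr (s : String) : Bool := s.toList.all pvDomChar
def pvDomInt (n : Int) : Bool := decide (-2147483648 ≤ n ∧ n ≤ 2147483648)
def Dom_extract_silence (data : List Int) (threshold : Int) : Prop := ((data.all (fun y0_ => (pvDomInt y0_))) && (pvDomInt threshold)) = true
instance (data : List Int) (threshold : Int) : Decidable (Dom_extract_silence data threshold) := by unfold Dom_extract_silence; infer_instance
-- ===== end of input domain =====

-- B replaces A's edge detection (compare data[i] with data[i-1], mutate s[-1]) by a running
-- run-length counter appended when a run ends: same values, a plainer single accumulator loop.

-- ===== PORT A =====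
-- literal transliteration of A: s initialised from data[0]; loop over i in range(1, len(data)),
-- reading data[i] and data[i-1]; 's[-1] += 1' becomes dropLast ++ [last + 1].
def extract_silence (data : List Int) (threshold : Int) : List Int :=
  let s0 : List Int := if data.getD 0 0 ≤ threshold then [1] else []
  (List.range' 1 (data.length - 1)).foldl (fun s i =>
    if data.getD i 0 ≤ threshold then
      if data.getD (i - 1) 0 > threshold then s ++ [1]
      else if data.getD (i - 1) 0 ≤ threshold then s.dropLast ++ [s.getLast?.getD 0 + 1]
      else s
    else s) s0

-- ===== PORT B =====
def extract_silence_alt (data : List Int) (threshold : Int) : List Int :=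
  let p := data.foldl (fun (p : List Int × Int) x =>
    if x ≤ threshold then (p.1, p.2 + 1)
    else (if p.2 ≠ 0 then p.1 ++ [p.2] else p.1, 0)) ([], 0)
  if p.2 ≠ 0 then p.1 ++ [p.2] else p.1

-- ===== PRECONDITION & SPEC =====
-- Pre_ excludes only the empty list, on which A raises IndexError (data[0]).
def Pre_extract_silence (data : List Int) (threshold : Int) : Prop := data ≠ []
instance (data : List Int) (threshold : Int) : Decidable (Pre_extract_silence data threshold) := by unfold Pre_extract_silence; infer_instance
def pvWitness_extract_silence : List Int × Int := ([0, 300, 5, 3], 256)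

-- On empty data A raises IndexError (it indexes data[0]); B returns [].
def Raises_extract_silence (data : List Int) (threshold : Int) : Prop := data = []
instance (data : List Int) (threshold : Int) : Decidable (Raises_extract_silence data threshold) := by unfold Raises_extract_silence; infer_instance
def pvRaiseWitness_extract_silence : List Int × Int := ([], 0)
def pvRaiseWitnessOut_extract_silence : List Int := []

def Spec_extract_silence (data : List Int) (threshold : Int) (out : List Int) : Prop := out = extract_silence_alt data threshold
instance (data : List Int) (threshold : Int) (out : List Int) : Decidable (Spec_extract_silence data threshold out) := by unfold Spec_extract_silence; infer_instance

-- ===== CLAIM (what is proved, stated in full; the proofs are below) =====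
def Claim_equal_extract_silence : Prop := ∀ (data : List Int) (threshold : Int), Dom_extract_silence data threshold → Pre_extract_silence data threshold → Spec_extract_silence data threshold (extract_silence data threshold)
def Claim_raises_extract_silence : Prop := (∀ (data : List Int) (threshold : Int), Dom_extract_silence data threshold → Raises_extract_silence data threshold → ¬ Pre_extract_silence data threshold) ∧ (Dom_extract_silence (pvRaiseWitness_extract_silence.1) (pvRaiseWitness_extract_silence.2) ∧ Raises_extract_silence (pvRaiseWitness_extract_silence.1) (pvRaiseWitness_extract_silence.2) ∧ extract_silence_alt (pvRaiseWitness_extract_silence.1) (pvRaiseWitness_extract_silence.2) = pvRaiseWitnessOut_extract_silence)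

-- ===== LEMMAS AND PROOFS =====

-- A's loop body, as a function of the previous and current sample.
def stepA (t prev x : Int) (s : List Int) : List Int :=
  if x ≤ t then
    if prev > t then s ++ [1]
    else if prev ≤ t then s.dropLast ++ [s.getLast?.getD 0 + 1]
    else s
  else s

-- A's loop in previous/current form.
def loopA (t : Int) : Int → List Int → List Int → List Int
  | _, s, [] => s
  | prev, s, x :: xs => loopA t x (stepA t prev x s) xs

-- B's fold step.
def stepB (t : Int) (p : List Int × Int) (x : Int) : List Int × Int :=
  if x ≤ t then (p.1, p.2 + 1)
  else (if p.2 ≠ 0 then p.1 ++ [p.2] else p.1, 0)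

def finishB (p : List Int × Int) : List Int := if p.2 ≠ 0 then p.1 ++ [p.2] else p.1

lemma altB (data : List Int) (t : Int) :
    extract_silence_alt data t = finishB (data.foldl (stepB t) ([], 0)) := rfl

-- A's index fold equals loopA on the tail.
lemma rangeA (t : Int) (data rest s : List Int) (k : Nat) (prev : Int)
    (hk : 1 ≤ k) (hprev : data.getD (k - 1) 0 = prev) (hrest : data.drop k = rest) :
    (List.range' k rest.length).foldl (fun s i =>
      if data.getD i 0 ≤ t then
        if data.getD (i - 1) 0 > t then s ++ [1]
        else if data.getD (i - 1) 0 ≤ t then s.dropLast ++ [s.getLast?.getD 0 + 1]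
        else s
      else s) s = loopA t prev s rest := by
  induction rest generalizing k prev s with
  | nil => simp [loopA]
  | cons x xs ih =>
    have hk' : k < data.length := by
      by_contra h
      simp [List.drop_eq_nil_of_le (Nat.le_of_not_lt h)] at hrest
    have hx : data.getD k 0 = x := by
      have h' : data[k]? = some x := by
        have h2 : (data.drop k)[0]? = data[k + 0]? := List.getElem?_drop
        rw [hrest] at h2
        simpa using h2.symm
      simp [List.getD, h']
    have hdrop : data.drop (k + 1) = xs := by
      rw [← List.tail_drop, hrest]
      rfl
    rw [show (x :: xs).length = xs.length + 1 from rfl, List.range'_succ, List.foldl_cons]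
    rw [ih _ (k + 1) x (by omega) (by simpa using hx) hdrop]
    show loopA t x _ xs = loopA t prev s (x :: xs)
    rw [show loopA t prev s (x :: xs) = loopA t x (stepA t prev x s) xs from rfl]
    congr 1
    simp only [stepA, hx, hprev]

lemma headA (data : List Int) (t : Int) (d0 : Int) (rest : List Int) (h : data = d0 :: rest) :
    extract_silence data t =
      loopA t d0 (if d0 ≤ t then [1] else []) rest := by
  subst h
  unfold extract_silence
  have h0 : (d0 :: rest).getD 0 0 = d0 := rfl
  rw [h0]
  exact rangeA t (d0 :: rest) rest _ 1 d0 le_rfl (by simp) (by simp)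

-- The loop invariant: A's list is B's list with the current run (if any) appended.
lemma invariant (t : Int) (xs : List Int) :
    ∀ (prev : Int) (sB : List Int) (run : Int),
    (prev ≤ t → 1 ≤ run) → (¬ prev ≤ t → run = 0) →
    loopA t prev (if run ≠ 0 then sB ++ [run] else sB) xs =
      finishB (xs.foldl (stepB t) (sB, run)) := by
  induction xs with
  | nil =>
    intro prev sB run h1 h2
    by_cases hp : prev ≤ t <;> simp [loopA, finishB]
  | cons x xs ih =>
    intro prev sB run h1 h2
    by_cases hx : x ≤ t
    · by_cases hp : prev ≤ t
      · have hr : 1 ≤ run := h1 hp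
        have hne : run ≠ 0 := by omega
        have hne' : run + 1 ≠ 0 := by omega
        simp only [loopA, stepA, if_pos hx, if_neg (not_lt.mpr hp), if_pos hp,
          if_pos hne, List.foldl_cons, stepB]
        rw [List.dropLast_concat, List.getLast?_concat]
        simpa [hne'] using ih x sB (run + 1) (fun _ => by omega) (fun h => absurd hx h)
      · have hr : run = 0 := h2 hp
        subst hr
        simp only [loopA, stepA, if_pos hx, if_pos (not_le.mp hp), List.foldl_cons, stepB]
        simpa [hx] using ih x sB 1 (fun _ => by omega) (fun h => absurd hx h)
    · by_cases hp : prev ≤ t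
      · have hr : 1 ≤ run := h1 hp
        have hne : run ≠ 0 := by omega
        simp only [loopA, stepA, List.foldl_cons, stepB, if_neg hx, if_pos hne]
        simpa [hne] using ih x (sB ++ [run]) 0 (fun h => absurd h hx) (fun _ => rfl)
      · have hr : run = 0 := h2 hp
        subst hr
        simp only [loopA, stepA, List.foldl_cons, stepB, if_neg hx]
        simpa using ih x sB 0 (fun h => absurd h hx) (fun _ => rfl)

-- ===== VERDICT (by name: the statement is the Claim_ definition above) =====
theorem extract_silence_spec : Claim_equal_extract_silence := by
  intro data t _ hpre
  unfold Spec_extract_silence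
  obtain ⟨d0, rest, rfl⟩ := List.exists_cons_of_ne_nil hpre
  rw [headA (d0 :: rest) t d0 rest rfl, altB]
  rw [List.foldl_cons]
  by_cases h0 : d0 ≤ t
  · have : stepB t ([], 0) d0 = ([], 1) := by simp [stepB, h0]
    rw [this]
    simpa [h0] using invariant t rest d0 [] 1 (fun _ => by omega) (fun h => absurd h0 h)
  · have : stepB t ([], 0) d0 = ([], 0) := by simp [stepB, h0]
    rw [this]
    simpa [h0] using invariant t rest d0 [] 0 (fun h => absurd h h0) (fun _ => rfl)

theorem extract_silence_raises : Claim_raises_extract_silence := by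
  unfold Claim_raises_extract_silence
  exact ⟨fun data t _ hr => by simp [Pre_extract_silence, Raises_extract_silence] at *; exact hr,
    by decide⟩

-- self-check: the raise witness really is the recorded value of B (reads it off extract_silence_raises).
theorem pvRaiseWitness_ok :
    extract_silence_alt pvRaiseWitness_extract_silence.1 pvRaiseWitness_extract_silence.2 =
      pvRaiseWitnessOut_extract_silence :=
  extract_silence_raises.2.2.2
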